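-- pv_equiv track=rewrite | github.com/gessayrs/AOC_2023 | day02/puzzle1.py | game_formatting
-- ===== SOURCE A (Python) =====
-- def game_formatting(a):
--     new_game_list = []
--
--     for i in range(len(a)):
--         if a[i] == ":":
--             new_str = a[i+1:].split(";")
--             break
--         else:
--             pass
--
--     for i in new_str:
--         subset = i.strip()
--         subset_split = subset.split(",")
--
--         for j in subset_split:
--             new_game_list.append(j.strip())
--
--     return(new_game_list)
-- ===== SOURCE B (Python) =====
-- def game_formatting(a):
--     rest = a[a.index(":") + 1 :]
--     return [t.strip() for t in rest.replace(";", ",").split(",")]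
-- ===== Notes on version B (the rewrite author's own statement) =====
-- stated objective: simpler
-- what changed: Replaces A's index-scanning loop for ':' and its two nested split/strip loops by a.index(':') with a slice, one replace(';', ',') pass, a single split(',') and one strip per token in a flat comprehension.
import Mathlib
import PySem

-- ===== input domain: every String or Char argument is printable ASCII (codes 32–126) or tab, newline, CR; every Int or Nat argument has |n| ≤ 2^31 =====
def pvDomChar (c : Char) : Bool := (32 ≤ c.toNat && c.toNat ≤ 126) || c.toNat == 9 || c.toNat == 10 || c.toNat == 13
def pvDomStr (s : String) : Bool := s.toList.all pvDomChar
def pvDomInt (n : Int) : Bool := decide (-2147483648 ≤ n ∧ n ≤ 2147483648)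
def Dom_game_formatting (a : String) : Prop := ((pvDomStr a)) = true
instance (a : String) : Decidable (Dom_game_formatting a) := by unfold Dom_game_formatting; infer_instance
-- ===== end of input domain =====

-- B replaces A's index scan for ':' and two nested split/strip loops by partition(':'),
-- one replace(';', ',') pass, one split(',') and one strip per token (objective: simpler).

-- ===== PORT A =====
-- first loop of A: for i in range(len(a)): if a[i] == ":": new_str = a[i+1:].split(";"); break
-- returns none when no ':' occurs (Python: new_str unbound, the second loop raises NameError)
def gfFirstLoop (a : List Char) (i : Nat) : Option (List (List Char)) :=
  if h : i < a.length then
    if a[i] = ':' then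
      some (PySem.Chars.splitOn (PySem.List.slice a (some ((i : Int) + 1)) none) [';'])
    else gfFirstLoop a (i + 1)
  else none
  termination_by a.length - i

def game_formatting (a : String) : List String :=
  match gfFirstLoop a.toList 0 with
  | none => []   -- Python raises NameError here; excluded by Pre_game_formatting
  | some new_str =>
      new_str.foldl (fun acc i =>
        let subset := PySem.Chars.strip i
        let subset_split := PySem.Chars.splitOn subset [',']
        subset_split.foldl (fun acc2 j => acc2 ++ [String.mk (PySem.Chars.strip j)]) acc) []

-- ===== PORT B =====
-- str.partition(sep)[2] ported by hand (single-char sep): the suffix after the first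
-- occurrence of sep, [] when sep is absent — exact for Python's partition third component.
def pvPartAfter (sep : Char) : List Char → List Char
  | [] => []
  | c :: t => if c = sep then t else pvPartAfter sep t

def game_formatting_alt (a : String) : List String :=
  let rest := pvPartAfter ':' a.toList
  (PySem.Chars.splitOn (PySem.Chars.replace rest [';'] [',']) [',']).map
    (fun t => String.mk (PySem.Chars.strip t))

-- ===== PRECONDITION & SPEC =====
-- Pre_: A raises NameError when a has no ':' (new_str is never bound); exactly those inputs are excluded.
def Pre_game_formatting (a : String) : Prop := PySem.Str.isIn ":" a = true
instance (a : String) : Decidable (Pre_game_formatting a) := by unfold Pre_game_formatting; infer_instance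
def pvWitness_game_formatting : String := "Game 1: 3 blue, 4 red; 1 red, 2 green"

def Spec_game_formatting (a : String) (out : List String) : Prop := out = game_formatting_alt a
instance (a : String) (out : List String) : Decidable (Spec_game_formatting a out) := by unfold Spec_game_formatting; infer_instance

-- ===== CLAIM (what is proved, stated in full; the proofs are below) =====
def Claim_equal_game_formatting : Prop := ∀ (a : String), Dom_game_formatting a → Pre_game_formatting a → Spec_game_formatting a (game_formatting a)
-- ===== LEMMAS AND PROOFS =====

-- proof-side model of s.split(c) for a one-char separator
def pvSplitc (c : Char) : List Char → List (List Char)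
  | [] => [[]]
  | x :: t =>
      if x = c then [] :: pvSplitc c t
      else match pvSplitc c t with
           | [] => [[x]]
           | h :: tl => (x :: h) :: tl

def pvModHead (p : List Char) : List (List Char) → List (List Char)
  | [] => [p]
  | h :: tl => (p ++ h) :: tl

theorem pvSplitc_ne_nil (c : Char) (s : List Char) : pvSplitc c s ≠ [] := by
  cases s with
  | nil => simp [pvSplitc]
  | cons x t =>
      simp only [pvSplitc]
      split
      · simp
      · split <;> simp

theorem pvSplitOn_go_eq (c : Char) :
    ∀ (fuel : Nat) (l cur : List Char) (acc : List (List Char)), l.length ≤ fuel →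
      PySem.Chars.splitOn.go [c] fuel l cur acc
        = acc.reverse ++ pvModHead cur.reverse (pvSplitc c l) := by
  intro fuel
  induction fuel with
  | zero =>
      intro l cur acc h
      have : l = [] := List.length_eq_zero_iff.mp (Nat.le_zero.mp h)
      subst this
      simp [PySem.Chars.splitOn.go, pvSplitc, pvModHead]
  | succ fuel ih =>
      intro l cur acc h
      cases l with
      | nil => simp [PySem.Chars.splitOn.go, pvSplitc, pvModHead]
      | cons x t =>
          simp only [PySem.Chars.splitOn.go]
          by_cases hx : x = c
          · subst hx
            have hpre : List.isPrefixOf [x] (x :: t) = true := by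
              simp [List.isPrefixOf]
            rw [if_pos hpre]
            simp only [List.length_singleton, List.drop_succ_cons, List.drop_zero]
            rw [ih t [] (cur.reverse :: acc) (by simpa using Nat.le_of_succ_le_succ h)]
            simp only [pvSplitc]
            cases hs : pvSplitc x t with
            | nil => exact absurd hs (pvSplitc_ne_nil x t)
            | cons sh stl => simp [pvModHead]
          · have hpre : List.isPrefixOf [c] (x :: t) = false := by
              simp [List.isPrefixOf]
              exact fun hcx => absurd hcx.symm hx
            rw [if_neg (by simp [hpre])]
            rw [ih t (x :: cur) acc (by simpa using Nat.le_of_succ_le_succ h)]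
            simp only [pvSplitc, if_neg hx]
            cases hs : pvSplitc c t with
            | nil => exact absurd hs (pvSplitc_ne_nil c t)
            | cons sh stl => simp [pvModHead]

theorem pvSplitOn_eq (c : Char) (s : List Char) :
    PySem.Chars.splitOn s [c] = pvSplitc c s := by
  have h := pvSplitOn_go_eq c (s.length + 1) s [] [] (Nat.le_succ _)
  have hgo : PySem.Chars.splitOn s [c] = PySem.Chars.splitOn.go [c] (s.length + 1) s [] [] := rfl
  rw [hgo, h]
  cases hs : pvSplitc c s with
  | nil => exact absurd hs (pvSplitc_ne_nil c s)
  | cons sh stl => simp [pvModHead]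

theorem pvReplace_go_eq (c d : Char) :
    ∀ (fuel : Nat) (l acc : List Char), l.length ≤ fuel →
      PySem.Chars.replace.go [c] [d] fuel l acc
        = acc.reverse ++ l.map (fun x => if x = c then d else x) := by
  intro fuel
  induction fuel with
  | zero =>
      intro l acc h
      have : l = [] := List.length_eq_zero_iff.mp (Nat.le_zero.mp h)
      subst this
      simp [PySem.Chars.replace.go]
  | succ fuel ih =>
      intro l acc h
      cases l with
      | nil => simp [PySem.Chars.replace.go]
      | cons x t =>
          simp only [PySem.Chars.replace.go]
          by_cases hx : x = c
          · subst hx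
            have hpre : List.isPrefixOf [x] (x :: t) = true := by simp [List.isPrefixOf]
            rw [if_pos hpre]
            simp only [List.length_singleton, List.drop_succ_cons, List.drop_zero]
            rw [ih t ([d].reverse ++ acc) (by simpa using Nat.le_of_succ_le_succ h)]
            simp
          · have hpre : List.isPrefixOf [c] (x :: t) = false := by
              simp [List.isPrefixOf]
              exact fun hcx => absurd hcx.symm hx
            rw [if_neg (by simp [hpre])]
            rw [ih t (x :: acc) (by simpa using Nat.le_of_succ_le_succ h)]
            simp [hx]

theorem pvReplace_eq (c d : Char) (s : List Char) :
    PySem.Chars.replace s [c] [d] = s.map (fun x => if x = c then d else x) := by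
  have h := pvReplace_go_eq c d s.length s [] (Nat.le_refl _)
  have hr : PySem.Chars.replace s [c] [d] = PySem.Chars.replace.go [c] [d] s.length s [] := by
    simp [PySem.Chars.replace]
  rw [hr, h]; simp

-- strip facts
theorem pvLstrip_cons_space (x : Char) (h : PySem.Chars.isspace x = true) (s : List Char) :
    PySem.Chars.lstrip (x :: s) = PySem.Chars.lstrip s := by
  simp [PySem.Chars.lstrip, List.dropWhile, h]

theorem pvStrip_cons_space (x : Char) (h : PySem.Chars.isspace x = true) (s : List Char) :
    PySem.Chars.strip (x :: s) = PySem.Chars.strip s := by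
  simp [PySem.Chars.strip, pvLstrip_cons_space x h]

theorem pvRstrip_append_space (x : Char) (h : PySem.Chars.isspace x = true) (s : List Char) :
    PySem.Chars.rstrip (s ++ [x]) = PySem.Chars.rstrip s := by
  simp [PySem.Chars.rstrip, h]

theorem pvRstrip_append_nonspace (x : Char) (h : PySem.Chars.isspace x = false) (s : List Char) :
    PySem.Chars.rstrip (s ++ [x]) = s ++ [x] := by
  simp [PySem.Chars.rstrip, h]

-- trimming from the left and from the right commute
theorem pvStrip_comm (s : List Char) :
    PySem.Chars.lstrip (PySem.Chars.rstrip s) = PySem.Chars.rstrip (PySem.Chars.lstrip s) := by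
  induction s with
  | nil => simp [PySem.Chars.lstrip, PySem.Chars.rstrip]
  | cons a t ih =>
      by_cases ha : PySem.Chars.isspace a = true
      · rw [pvLstrip_cons_space a ha]
        cases hw : List.dropWhile PySem.Chars.isspace t.reverse with
        | nil =>
            have hrt : PySem.Chars.rstrip t = [] := by simp [PySem.Chars.rstrip, hw]
            have h1 : PySem.Chars.rstrip (a :: t) = [] := by
              simp only [PySem.Chars.rstrip, List.reverse_cons]
              rw [List.dropWhile_append]
              simp [hw, List.dropWhile, ha]
            rw [h1, ← ih, hrt]
        | cons w ws =>
            have h1 : PySem.Chars.rstrip (a :: t) = a :: PySem.Chars.rstrip t := by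
              simp only [PySem.Chars.rstrip, List.reverse_cons]
              rw [List.dropWhile_append]
              simp [hw]
            rw [h1, pvLstrip_cons_space a ha, ih]
      · have ha' : PySem.Chars.isspace a = false := by simpa using ha
        have hl : PySem.Chars.lstrip (a :: t) = a :: t := by
          simp [PySem.Chars.lstrip, List.dropWhile, ha']
        rw [hl]
        -- rstrip (a :: t) is [] or starts with a, a non-space: lstrip is the identity on it
        have h1 : PySem.Chars.rstrip (a :: t)
            = (List.dropWhile PySem.Chars.isspace (t.reverse ++ [a])).reverse := by
          simp [PySem.Chars.rstrip]
        rw [h1]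
        rw [List.dropWhile_append]
        cases hw : List.dropWhile PySem.Chars.isspace t.reverse with
        | nil => simp [List.dropWhile, ha', PySem.Chars.lstrip]
        | cons w ws =>
            rw [if_neg (by simp)]
            have hrev : (((w :: ws) ++ [a]) : List Char).reverse = a :: (ws.reverse ++ [w]) := by
              simp
            rw [hrev]
            simp [PySem.Chars.lstrip, List.dropWhile, ha']

theorem pvStrip_append_space (x : Char) (h : PySem.Chars.isspace x = true) (s : List Char) :
    PySem.Chars.strip (s ++ [x]) = PySem.Chars.strip s := by
  have e1 : PySem.Chars.strip (s ++ [x])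
      = PySem.Chars.lstrip (PySem.Chars.rstrip (s ++ [x])) := by
    simp [PySem.Chars.strip, pvStrip_comm]
  rw [e1, pvRstrip_append_space x h, pvStrip_comm]
  rfl

-- stripping each piece absorbs an lstrip of the whole string (c not whitespace)
theorem pvMapStrip_splitc_lstrip (c : Char) (hc : PySem.Chars.isspace c = false) (s : List Char) :
    (pvSplitc c (PySem.Chars.lstrip s)).map PySem.Chars.strip
      = (pvSplitc c s).map PySem.Chars.strip := by
  induction s with
  | nil => rfl
  | cons x t ih =>
      by_cases hx : PySem.Chars.isspace x = true
      · rw [pvLstrip_cons_space x hx, ih]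
        have hxc : ¬ x = c := fun h => by rw [h] at hx; rw [hc] at hx; exact Bool.false_ne_true hx
        simp only [pvSplitc, if_neg hxc]
        cases hs : pvSplitc c t with
        | nil => exact absurd hs (pvSplitc_ne_nil c t)
        | cons sh stl => simp [pvStrip_cons_space x hx]
      · have : PySem.Chars.lstrip (x :: t) = x :: t := by
          simp only [PySem.Chars.lstrip, List.dropWhile]
          simp [Bool.eq_false_iff.mpr hx]
        rw [this]

-- appending one non-separator char only extends the last piece
theorem pvSplitc_append_nonsep (c x : Char) (hxc : x ≠ c) (s : List Char) :
    ∃ h tl, pvSplitc c s = h ++ [tl] ∧ pvSplitc c (s ++ [x]) = h ++ [tl ++ [x]] := by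
  induction s with
  | nil => exact ⟨[], [], rfl, by simp [pvSplitc, hxc]⟩
  | cons y t ih =>
      obtain ⟨h, tl, h1, h2⟩ := ih
      by_cases hy : y = c
      · subst hy
        refine ⟨[] :: h, tl, ?_, ?_⟩ <;> simp [pvSplitc, h1, h2]
      · cases h with
        | nil =>
            simp only [List.nil_append] at h1 h2
            refine ⟨[], y :: tl, ?_, ?_⟩ <;> simp [pvSplitc, hy, h1, h2]
        | cons hh ht =>
            refine ⟨(y :: hh) :: ht, tl, ?_, ?_⟩ <;>
              simp [pvSplitc, hy, h1, h2]

-- stripping each piece absorbs an rstrip of the whole string (c not whitespace)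
theorem pvMapStrip_splitc_rstrip (c : Char) (hc : PySem.Chars.isspace c = false) (s : List Char) :
    (pvSplitc c (PySem.Chars.rstrip s)).map PySem.Chars.strip
      = (pvSplitc c s).map PySem.Chars.strip := by
  induction s using List.reverseRecOn with
  | nil => rfl
  | append_singleton t x ih =>
      by_cases hx : PySem.Chars.isspace x = true
      · rw [pvRstrip_append_space x hx, ih]
        have hxc : x ≠ c := fun h => by rw [h] at hx; rw [hc] at hx; exact Bool.false_ne_true hx
        obtain ⟨h, tl, h1, h2⟩ := pvSplitc_append_nonsep c x hxc t
        rw [h1, h2]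
        simp [pvStrip_append_space x hx]
      · rw [pvRstrip_append_nonspace x (by simpa using hx)]

theorem pvMapStrip_splitc_strip (c : Char) (hc : PySem.Chars.isspace c = false) (s : List Char) :
    (pvSplitc c (PySem.Chars.strip s)).map PySem.Chars.strip
      = (pvSplitc c s).map PySem.Chars.strip := by
  have e : PySem.Chars.strip s = PySem.Chars.rstrip (PySem.Chars.lstrip s) := rfl
  rw [e, pvMapStrip_splitc_rstrip c hc, pvMapStrip_splitc_lstrip c hc]

-- splitting on ';' then on ',' flattens to one split after replacing ';' by ','
theorem pvSplitc_replace (s : List Char) :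
    (pvSplitc ';' s).flatMap (pvSplitc ',')
      = pvSplitc ',' (s.map (fun x => if x = ';' then ',' else x)) := by
  induction s with
  | nil => rfl
  | cons x t ih =>
      rw [List.map_cons]
      by_cases hx : x = ';'
      · subst hx
        rw [if_pos rfl]
        rw [show pvSplitc ';' (';' :: t) = [] :: pvSplitc ';' t from by simp [pvSplitc]]
        rw [show pvSplitc ',' (',' :: t.map (fun x => if x = ';' then ',' else x))
              = [] :: pvSplitc ',' (t.map (fun x => if x = ';' then ',' else x)) from by
            simp [pvSplitc]]
        rw [List.flatMap_cons, ih]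
        rfl
      · rw [if_neg hx]
        obtain ⟨sh, stl, hs⟩ : ∃ sh stl, pvSplitc ';' t = sh :: stl := by
          cases h : pvSplitc ';' t with
          | nil => exact absurd h (pvSplitc_ne_nil ';' t)
          | cons u v => exact ⟨u, v, rfl⟩
        obtain ⟨h2, t2, hs2⟩ : ∃ h2 t2, pvSplitc ',' sh = h2 :: t2 := by
          cases h : pvSplitc ',' sh with
          | nil => exact absurd h (pvSplitc_ne_nil ',' sh)
          | cons u v => exact ⟨u, v, rfl⟩
        have hstep : pvSplitc ';' (x :: t) = (x :: sh) :: stl := by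
          simp [pvSplitc, hx, hs]
        have ih' : pvSplitc ',' (t.map (fun x => if x = ';' then ',' else x))
            = (h2 :: t2) ++ stl.flatMap (pvSplitc ',') := by
          rw [← ih, hs, List.flatMap_cons, hs2]
        by_cases hx2 : x = ','
        · subst hx2
          rw [hstep, List.flatMap_cons]
          rw [show pvSplitc ',' (',' :: sh) = [] :: pvSplitc ',' sh from by simp [pvSplitc]]
          rw [show pvSplitc ','
                (',' :: t.map (fun x => if x = ';' then ',' else x))
              = [] :: pvSplitc ',' (t.map (fun x => if x = ';' then ',' else x)) from by
            simp [pvSplitc]]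
          rw [ih', hs2]
          rfl
        · rw [hstep, List.flatMap_cons]
          rw [show pvSplitc ',' (x :: sh) = (x :: h2) :: t2 from by
            simp [pvSplitc, hx2, hs2]]
          rw [show pvSplitc ',' (x :: t.map (fun x => if x = ';' then ',' else x))
              = (x :: h2) :: (t2 ++ stl.flatMap (pvSplitc ',')) from by
            simp [pvSplitc, hx2, ih']]
          rfl

-- the outer loop of A as a flatMap
theorem pvOuterLoop_eq (l : List (List Char)) (acc : List String) :
    l.foldl (fun acc i =>
        (PySem.Chars.splitOn (PySem.Chars.strip i) [',']).foldl
          (fun acc2 j => acc2 ++ [String.mk (PySem.Chars.strip j)]) acc) acc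
      = acc ++ l.flatMap (fun i =>
          (pvSplitc ',' (PySem.Chars.strip i)).map (fun j => String.mk (PySem.Chars.strip j))) := by
  induction l generalizing acc with
  | nil => simp
  | cons x t ih =>
      simp only [List.foldl_cons, List.flatMap_cons]
      rw [pvSplitOn_eq, PySem.List.foldl_append_singleton_eq_map, ih]
      simp

-- the colon scan of A finds the same remainder as B's partition
theorem pvGfFirstLoop_eq (a : List Char) :
    ∀ i, gfFirstLoop a i =
      (if ':' ∈ a.drop i then
        some (PySem.Chars.splitOn (pvPartAfter ':' (a.drop i)) [';']) else none) := by
  intro i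
  generalize hn : a.length - i = n
  induction n generalizing i with
  | zero =>
      have hge : a.length ≤ i := by omega
      rw [gfFirstLoop, dif_neg (by omega)]
      rw [List.drop_eq_nil_of_le hge]
      simp
  | succ n ihn =>
      have hlt : i < a.length := by omega
      rw [gfFirstLoop, dif_pos hlt]
      have hdrop : a.drop i = a[i] :: a.drop (i + 1) := List.drop_eq_getElem_cons hlt
      by_cases hc : a[i] = ':'
      · rw [if_pos hc, hdrop, hc]
        rw [if_pos (List.mem_cons_self ..)]
        have hcast : ((i : Int) + 1) = (((i + 1 : Nat) : Int)) := by push_cast; ring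
        rw [hcast, PySem.List.slice_from_natCast]
        rw [show pvPartAfter ':' (':' :: a.drop (i + 1)) = a.drop (i + 1) from by
          simp [pvPartAfter]]
      · rw [if_neg hc, ihn (i + 1) (by omega), hdrop]
        rw [show pvPartAfter ':' (a[i] :: a.drop (i + 1)) = pvPartAfter ':' (a.drop (i + 1)) from by
          simp [pvPartAfter, hc]]
        have hiff : (':' ∈ a[i] :: a.drop (i + 1)) ↔ (':' ∈ a.drop (i + 1)) := by
          constructor
          · intro h
            rcases List.mem_cons.mp h with h | h
            · exact absurd h.symm hc
            · exact h
          · exact fun h => List.mem_cons_of_mem _ h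
        rw [if_congr hiff rfl rfl]

-- each piece of the inner loop, after stripping the outer segment first
theorem pvPiece_eq (i : List Char) :
    (pvSplitc ',' (PySem.Chars.strip i)).map (fun j => String.mk (PySem.Chars.strip j))
      = ((pvSplitc ',' i).map PySem.Chars.strip).map String.mk := by
  rw [show (fun j => String.mk (PySem.Chars.strip j)) = String.mk ∘ PySem.Chars.strip from rfl]
  rw [← List.map_map, pvMapStrip_splitc_strip ',' (by decide)]

theorem pvMem_singleton_infix (x : Char) (l : List Char) : [x] <:+: l ↔ x ∈ l := by
  constructor
  · rintro ⟨s, t, rfl⟩; simp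
  · intro h; obtain ⟨s, t, rfl⟩ := List.append_of_mem h; exact ⟨s, t, by simp⟩

-- ===== VERDICT (by name: the statement is the Claim_ definition above) =====
set_option maxHeartbeats 1000000 in
theorem game_formatting_spec : Claim_equal_game_formatting := by
  intro a _dom hpre
  unfold Spec_game_formatting
  have hmem : ':' ∈ a.toList := by
    unfold Pre_game_formatting at hpre
    have h3 : (":".toList) <:+: a.toList := (PySem.Str.isIn_iff_infix _ _).mp hpre
    have he : (":".toList) = [':'] := rfl
    rw [he] at h3
    exact (pvMem_singleton_infix ':' a.toList).mp h3
  have hloop : gfFirstLoop a.toList 0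
      = some (PySem.Chars.splitOn (pvPartAfter ':' a.toList) [';']) := by
    rw [pvGfFirstLoop_eq a.toList 0, List.drop_zero, if_pos hmem]
  unfold game_formatting game_formatting_alt
  rw [hloop]
  dsimp only
  rw [pvOuterLoop_eq, List.nil_append, pvSplitOn_eq, pvReplace_eq, pvSplitOn_eq]
  simp only [pvPiece_eq]
  rw [← List.map_flatMap, ← List.map_flatMap, pvSplitc_replace]
  rw [show (fun t => String.mk (PySem.Chars.strip t)) = String.mk ∘ PySem.Chars.strip from rfl]
  rw [← List.map_map]
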